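-- pv_equiv track=rewrite | github.com/nhhoang14/CodePTIT_Source | CodePTIT - PYTHON/PY01027 - SỐ LỘC PHÁT ĐẸP.py | check
-- ===== SOURCE A (Python) =====
-- def check(s):
--     cnt = 0
--     for c in s:
--         if c != '8' and c != '6':
--             return "NO"
--         if c == '8':
--             cnt += 1
--             if cnt == 3:
--                 return "NO"
--         else:
--             cnt = 0
--     return "YES"
-- ===== SOURCE B (Python) =====
-- def check(s):
--     if set(s) <= {'6', '8'} and '888' not in s:
--         return "YES"
--     return "NO"
-- ===== Notes on version B (the rewrite author's own statement) =====
-- stated objective: simpler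
-- what changed: Replaced A's stateful per-character loop (run counter with early returns) by a boolean combination of two whole-string checks: set(s) <= {'6','8'} and '888' not in s.
import Mathlib
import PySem

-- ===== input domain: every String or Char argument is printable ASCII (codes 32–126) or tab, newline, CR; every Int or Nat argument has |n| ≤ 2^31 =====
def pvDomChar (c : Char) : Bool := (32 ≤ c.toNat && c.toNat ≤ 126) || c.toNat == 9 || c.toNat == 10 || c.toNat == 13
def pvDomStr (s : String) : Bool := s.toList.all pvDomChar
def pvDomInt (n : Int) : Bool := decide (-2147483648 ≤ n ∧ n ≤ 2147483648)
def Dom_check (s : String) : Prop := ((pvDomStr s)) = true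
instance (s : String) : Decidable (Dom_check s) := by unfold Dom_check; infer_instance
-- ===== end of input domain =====

-- B replaces A's stateful run-counter loop by two whole-string checks
-- (every char in {'6','8'}, and no '888' substring); same result, simpler shape.

-- ===== PORT A =====
def checkLoop : List Char → Nat → String
  | [], _ => "YES"
  | c :: rest, cnt =>
    if c ≠ '8' ∧ c ≠ '6' then "NO"
    else if c = '8' then
      if cnt + 1 = 3 then "NO" else checkLoop rest (cnt + 1)
    else checkLoop rest 0

def check (s : String) : String := checkLoop s.toList 0

-- ===== PORT B =====
def check_alt (s : String) : String :=
  if PySem.Set.issubset (PySem.Set.ofList s.toList) (PySem.Set.ofList ['6', '8'])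
       && !(PySem.Str.isIn "888" s)
  then "YES" else "NO"

-- ===== PRECONDITION & SPEC =====
def Spec_check (s : String) (out : String) : Prop := out = check_alt s
instance (s : String) (out : String) : Decidable (Spec_check s out) := by unfold Spec_check; infer_instance

-- ===== CLAIM (what is proved, stated in full; the proofs are below) =====
def Claim_equal_check : Prop := ∀ (s : String), Dom_check s → Spec_check s (check s)

-- ===== LEMMAS AND PROOFS =====

lemma prefix_append_cons_of_not_mem {α : Type} {c : α} {sub u v : List α}
    (hc : c ∉ sub) (h : sub <+: u ++ c :: v) : sub <+: u := by
  induction sub generalizing u with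
  | nil => exact List.nil_prefix
  | cons a t ih =>
    cases u with
    | nil =>
      rcases List.cons_prefix_cons.mp h with ⟨rfl, -⟩
      exact absurd List.mem_cons_self hc
    | cons b u' =>
      rcases List.cons_prefix_cons.mp h with ⟨rfl, ht⟩
      exact List.cons_prefix_cons.mpr ⟨rfl, ih (fun hm => hc (List.mem_cons_of_mem _ hm)) ht⟩

lemma infix_append_cons_of_not_mem {α : Type} {c : α} {sub u v : List α}
    (hc : c ∉ sub) : sub <:+: u ++ c :: v ↔ sub <:+: u ∨ sub <:+: v := by
  constructor
  · intro h
    induction u with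
    | nil =>
      rcases List.infix_cons_iff.mp h with hp | hi
      · cases sub with
        | nil => exact Or.inl (List.nil_infix)
        | cons a t =>
          rcases List.cons_prefix_cons.mp hp with ⟨rfl, -⟩
          exact absurd List.mem_cons_self hc
      · exact Or.inr hi
    | cons b u' ih =>
      rcases List.infix_cons_iff.mp h with hp | hi
      · exact Or.inl ((prefix_append_cons_of_not_mem hc (by simpa using hp)).isInfix)
      · rcases ih hi with h1 | h2
        · exact Or.inl (h1.trans (List.suffix_cons b u').isInfix)
        · exact Or.inr h2
  · rintro (h | h)
    · exact h.trans (List.prefix_append u (c :: v)).isInfix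
    · exact h.trans ((List.suffix_cons c v).trans (List.suffix_append u (c :: v))).isInfix

lemma loopEq (l : List Char) : ∀ (cnt : Nat), cnt ≤ 2 →
    checkLoop l cnt =
      if (∀ c ∈ l, c = '6' ∨ c = '8') ∧
          ¬ (['8', '8', '8'] <:+: (List.replicate cnt '8' ++ l))
      then "YES" else "NO" := by
  induction l with
  | nil =>
    intro cnt h
    rw [checkLoop, if_pos]
    refine ⟨by simp, fun hinf => ?_⟩
    have := hinf.length_le
    simp at this; omega
  | cons c rest ih =>
    intro cnt h
    by_cases h8 : c = '8'
    · subst h8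
      rw [checkLoop, if_neg (by simp), if_pos rfl]
      by_cases hc : cnt + 1 = 3
      · rw [if_pos hc]
        have hc2 : cnt = 2 := by omega
        subst hc2
        have hno : ¬ ((∀ c ∈ ('8' :: rest), c = '6' ∨ c = '8') ∧
            ¬ (['8', '8', '8'] <:+: List.replicate 2 '8' ++ '8' :: rest)) := by
          rintro ⟨-, hn⟩
          exact hn ⟨[], rest, rfl⟩
        rw [if_neg hno]
      · have hrep : List.replicate cnt '8' ++ '8' :: rest
            = List.replicate (cnt + 1) '8' ++ rest := by
          rw [List.replicate_succ']; simp
        rw [if_neg hc, ih (cnt + 1) (by omega), hrep]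
        congr 1
        simp only [eq_iff_iff, and_congr_left_iff]
        intro _
        constructor
        · intro hall c hm
          rcases List.mem_cons.mp hm with rfl | hm'
          · exact Or.inr rfl
          · exact hall c hm'
        · intro hall c hm; exact hall c (List.mem_cons_of_mem _ hm)
    · by_cases h6 : c = '6'
      · subst h6
        rw [checkLoop, if_neg (by simp), if_neg (by decide), ih 0 (by omega)]
        congr 1
        simp only [List.replicate_zero, List.nil_append, eq_iff_iff]
        rw [infix_append_cons_of_not_mem (by decide)]
        have hnl : ¬ (['8', '8', '8'] <:+: List.replicate cnt '8') := by
          intro hinf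
          have := hinf.length_le
          simp at this; omega
        constructor
        · rintro ⟨hall, hn⟩
          refine ⟨fun c hm => ?_, ?_⟩
          · rcases List.mem_cons.mp hm with rfl | hm'
            · exact Or.inl rfl
            · exact hall c hm'
          · rintro (hi | hi)
            · exact hnl hi
            · exact hn hi
        · rintro ⟨hall, hn⟩
          exact ⟨fun c hm => hall c (List.mem_cons_of_mem _ hm), fun hi => hn (Or.inr hi)⟩
      · rw [checkLoop, if_pos ⟨h8, h6⟩]
        have hno : ¬ ((∀ x ∈ (c :: rest), x = '6' ∨ x = '8') ∧
            ¬ (['8', '8', '8'] <:+: List.replicate cnt '8' ++ c :: rest)) := by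
          rintro ⟨hall, -⟩
          rcases hall c List.mem_cons_self with hx | hx
          · exact h6 hx
          · exact h8 hx
        rw [if_neg hno]

lemma issubset_68 (l : List Char) :
    (PySem.Set.issubset (PySem.Set.ofList l) (PySem.Set.ofList ['6', '8']) = true)
      ↔ ∀ c ∈ l, c = '6' ∨ c = '8' := by
  have h2 : PySem.Set.ofList ['6', '8'] = ['6', '8'] := by decide
  unfold PySem.Set.issubset
  rw [h2, List.all_eq_true]
  constructor
  · intro h c hm
    have hc := h c ((PySem.Set.mem_ofList l c).mpr hm)
    have hmem : c ∈ (['6', '8'] : List Char) := by simpa using hc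
    simpa using hmem
  · intro h c hm
    have hm' : c ∈ l := (PySem.Set.mem_ofList l c).mp hm
    rcases h c hm' with rfl | rfl <;> decide

-- ===== VERDICT (by name: the statement is the Claim_ definition above) =====
theorem check_spec : Claim_equal_check := by
  intro s _
  unfold Spec_check check check_alt
  rw [loopEq s.toList 0 (by omega)]
  simp only [List.replicate_zero, List.nil_append]
  have h888 : "888".toList = ['8', '8', '8'] := rfl
  by_cases hsub : ∀ c ∈ s.toList, c = '6' ∨ c = '8'
  · have h1 := (issubset_68 s.toList).mpr hsub
    by_cases hinf : (['8', '8', '8'] : List Char) <:+: s.toList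
    · have hS : PySem.Str.isIn "888" s = true :=
        (PySem.Str.isIn_iff_infix "888" s).mpr (by rw [h888]; exact hinf)
      rw [if_neg (by tauto), h1, hS, Bool.true_and, Bool.not_true, if_neg (by simp)]
    · have hS : PySem.Str.isIn "888" s = false := by
        rw [Bool.eq_false_iff]
        intro hh
        rw [PySem.Str.isIn_iff_infix, h888] at hh
        exact hinf hh
      rw [if_pos ⟨hsub, hinf⟩, h1, hS, Bool.true_and, Bool.not_false, if_pos (by simp)]
  · have h1 : PySem.Set.issubset (PySem.Set.ofList s.toList) (PySem.Set.ofList ['6', '8']) = false := by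
      rw [Bool.eq_false_iff]
      intro hh
      exact hsub ((issubset_68 s.toList).mp hh)
    rw [if_neg (by tauto), h1, Bool.false_and, if_neg (by simp)]
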